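-- pv_equiv track=rewrite | github.com/project-c3ds/climate-health-news | preprocess/check_health_concepts.py | has_health_concept
-- ===== SOURCE A (Python) =====
-- from typing import List, Dict, Set
--
-- def has_health_concept(article: Dict, health_uris: Set[str]) -> bool:
--     """
--     Check if an article contains any health-related concepts.
--
--     Args:
--         article: Article dictionary with 'concepts' field
--         health_uris: Set of health concept URIs to check against
--
--     Returns:
--         True if article has at least one health concept, False otherwise
--     """
--     concepts = article.get("concepts", [])
--
--     if not concepts:
--         return False
--
--     # Check if any concept URI matches a health URI
--     for concept in concepts:
--         concept_uri = concept.get("uri", "")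
--         if concept_uri in health_uris:
--             return True
--
--     return False
-- ===== SOURCE B (Python) =====
-- def has_health_concept(article, health_uris):
--     # Invert the traversal: collect the article's concept URIs once,
--     # then scan the health-URI set, asking whether any of ITS members
--     # occurs among the article's URIs.
--     concept_uris = [c.get("uri", "") for c in article.get("concepts", [])]
--     return any(h in concept_uris for h in health_uris)
-- ===== Notes on version B (the rewrite author's own statement) =====
-- stated objective: alternative
-- what changed: Inverts the traversal: instead of looping over the article's concepts and testing each URI against the health set, B materializes the concept-URI list once and loops over health_uris, testing each health URI for membership in that list; correct because both decide whether the two URI collections intersect.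
import Mathlib
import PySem

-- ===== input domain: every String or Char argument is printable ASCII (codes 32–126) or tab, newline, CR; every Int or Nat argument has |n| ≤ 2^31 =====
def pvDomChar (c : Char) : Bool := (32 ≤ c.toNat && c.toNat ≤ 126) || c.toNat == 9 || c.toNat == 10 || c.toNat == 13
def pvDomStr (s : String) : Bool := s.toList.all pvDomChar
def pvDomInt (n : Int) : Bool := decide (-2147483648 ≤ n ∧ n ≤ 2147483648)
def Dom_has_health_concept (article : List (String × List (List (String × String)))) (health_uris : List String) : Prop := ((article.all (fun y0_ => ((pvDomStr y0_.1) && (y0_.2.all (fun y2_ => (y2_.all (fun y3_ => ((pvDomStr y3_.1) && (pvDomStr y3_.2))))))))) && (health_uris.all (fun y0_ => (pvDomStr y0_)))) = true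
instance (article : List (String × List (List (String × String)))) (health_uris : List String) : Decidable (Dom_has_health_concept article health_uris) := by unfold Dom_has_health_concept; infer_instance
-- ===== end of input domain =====

-- B inverts the traversal: it collects the article's concept URIs once and scans health_uris for a member of that list; same return value.

-- ===== PORT A =====
-- loop over the concepts list: first concept whose "uri" (default "") is in health_uris returns True
def hhcLoop (health_uris : List String) : List (List (String × String)) → Bool
  | [] => false
  | c :: rest =>
      if health_uris.contains (PySem.Dict.getD (PySem.Dict.mk c) "uri" "") then true
      else hhcLoop health_uris rest

def has_health_concept (article : List (String × List (List (String × String)))) (health_uris : List String) : Bool :=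
  let concepts := PySem.Dict.getD (PySem.Dict.mk article) "concepts" []
  if concepts.isEmpty then false
  else hhcLoop health_uris concepts

-- ===== PORT B =====
def has_health_concept_alt (article : List (String × List (List (String × String)))) (health_uris : List String) : Bool :=
  let concept_uris := (PySem.Dict.getD (PySem.Dict.mk article) "concepts" []).map
    (fun c => PySem.Dict.getD (PySem.Dict.mk c) "uri" "")
  health_uris.any (fun h => concept_uris.contains h)

-- ===== PRECONDITION & SPEC =====
def Spec_has_health_concept (article : List (String × List (List (String × String)))) (health_uris : List String) (out : Bool) : Prop := out = has_health_concept_alt article health_uris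
instance (article : List (String × List (List (String × String)))) (health_uris : List String) (out : Bool) : Decidable (Spec_has_health_concept article health_uris out) := by unfold Spec_has_health_concept; infer_instance

-- ===== CLAIM (what is proved, stated in full; the proofs are below) =====
def Claim_equal_has_health_concept : Prop := ∀ (article : List (String × List (List (String × String)))) (health_uris : List String), Dom_has_health_concept article health_uris → Spec_has_health_concept article health_uris (has_health_concept article health_uris)

-- ===== LEMMAS AND PROOFS =====
lemma hhcLoop_eq_any (health_uris : List String) (l : List (List (String × String))) :
    hhcLoop health_uris l = l.any (fun c => health_uris.contains (PySem.Dict.getD (PySem.Dict.mk c) "uri" "")) := by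
  induction l with
  | nil => rfl
  | cons c rest ih =>
      simp only [hhcLoop, List.any_cons]
      split_ifs with h <;> simp_all

-- both sides decide "the two collections intersect"; swap which collection the `any` runs over
lemma any_contains_comm (s t : List String) :
    s.any (fun x => t.contains x) = t.any (fun x => s.contains x) := by
  rw [Bool.eq_iff_iff]
  simp only [List.any_eq_true, List.contains_eq_mem, decide_eq_true_eq]
  exact ⟨fun ⟨x, h1, h2⟩ => ⟨x, h2, h1⟩, fun ⟨x, h1, h2⟩ => ⟨x, h2, h1⟩⟩

-- ===== VERDICT (by name: the statement is the Claim_ definition above) =====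
theorem has_health_concept_spec : Claim_equal_has_health_concept := by
  intro article health_uris _
  unfold Spec_has_health_concept has_health_concept has_health_concept_alt
  simp only [hhcLoop_eq_any]
  cases PySem.Dict.getD (PySem.Dict.mk article) "concepts" ([] : List (List (String × String))) with
  | nil => simp
  | cons c rest =>
      simp only [List.isEmpty_cons, ← any_contains_comm, List.any_map]
      rfl
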